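-- pv_equiv track=rewrite | github.com/LiuYubo1995/RecipeQA | hasty_student/data_processing.py | transport_1_0_2
-- ===== SOURCE A (Python) =====
-- def transport_1_0_2(a):
--         max_step = 0
--         for i in a:
--             if max_step < len(i):
--                 max_step = len(i)
--         new = []
--         for i in range(max_step):
--             step = []
--             for j in a:
--                 if len(j) <= i:
--                     step.append(['0','0'])
--                 else:
--                     step.append(j[i])
--             new.append(step)
--         return new
-- ===== SOURCE B (Python) =====
-- def transport_1_0_2(a):
--     # zip_longest-style: iterate all rows simultaneously, head or pad, then tails
--     rows = a
--     new = []
--     while any(rows):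
--         new.append([r[0] if r else ['0', '0'] for r in rows])
--         rows = [r[1:] for r in rows]
--     return new
-- ===== Notes on version B (the rewrite author's own statement) =====
-- stated objective: alternative
-- what changed: Replaces the max-length scan plus index-based column extraction (range over columns with a per-element length check and j[i] lookup) by a zip_longest-style simultaneous traversal: repeatedly emit the heads of all rows (padding empty rows) and recurse on the tails until every row is exhausted.
import Mathlib
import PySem

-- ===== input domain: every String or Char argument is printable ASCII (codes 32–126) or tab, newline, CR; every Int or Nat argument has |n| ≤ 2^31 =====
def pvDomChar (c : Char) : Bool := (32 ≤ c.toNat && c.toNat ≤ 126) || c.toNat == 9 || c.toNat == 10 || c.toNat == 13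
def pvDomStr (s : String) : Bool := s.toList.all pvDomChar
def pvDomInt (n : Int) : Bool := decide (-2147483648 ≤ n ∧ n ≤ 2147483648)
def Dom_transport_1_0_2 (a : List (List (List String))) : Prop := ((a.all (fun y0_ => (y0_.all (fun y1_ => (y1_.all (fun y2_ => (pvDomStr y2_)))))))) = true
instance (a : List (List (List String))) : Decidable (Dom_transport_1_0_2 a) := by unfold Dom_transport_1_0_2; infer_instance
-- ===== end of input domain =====

-- B pads-and-transposes by zip_longest-style simultaneous head/tail iteration instead of
-- A's max-length scan plus index-based column extraction; same cost, alternative algorithm.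

-- ===== PORT A =====
def transport_1_0_2 (a : List (List (List String))) : List (List (List String)) :=
  let max_step : Int := a.foldl (fun m i => if m < (i.length : Int) then (i.length : Int) else m) 0
  (PySem.List.pyRange 0 max_step 1).foldl (fun new i =>
    new ++ [a.foldl (fun step j =>
      step ++ [if (j.length : Int) ≤ i then ["0", "0"]
               else (PySem.List.pyGet? j i).getD []]) []]) []

-- ===== PORT B =====
-- total number of cells left in the pending row suffixes (termination measure of the while loop)
def pvCells (rows : List (List (List String))) : Nat := (rows.map List.length).sum

theorem pvCells_tail_lt (rows : List (List (List String)))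
    (h : rows.any (fun r => !r.isEmpty) = true) :
    pvCells (rows.map List.tail) < pvCells rows := by
  induction rows with
  | nil => simp at h
  | cons r rs ih =>
    simp only [List.any_cons, Bool.or_eq_true] at h
    simp only [pvCells, List.map_cons, List.sum_cons] at *
    have hle : ((rs.map List.tail).map List.length).sum ≤ (rs.map List.length).sum := by
      rw [List.map_map]
      apply List.sum_le_sum
      intro x _; simp [List.length_tail]
    have htl : r.tail.length ≤ r.length := by cases r <;> simp
    rcases h with h | h
    · have hlt : r.tail.length < r.length := by cases r <;> simp_all
      omega
    · have h1 := ih h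
      omega

def altGo (rows : List (List (List String))) (out : List (List (List String))) :
    List (List (List String)) :=
  if h : rows.any (fun r => !r.isEmpty) then
    altGo (rows.map List.tail) (out ++ [rows.map (fun r => r.headD ["0", "0"])])
  else out
termination_by pvCells rows
decreasing_by simpa using pvCells_tail_lt rows h

def transport_1_0_2_alt (a : List (List (List String))) : List (List (List String)) :=
  altGo a []

-- ===== PRECONDITION & SPEC =====
def Spec_transport_1_0_2 (a : List (List (List String))) (out : List (List (List String))) : Prop := out = transport_1_0_2_alt a
instance (a : List (List (List String))) (out : List (List (List String))) : Decidable (Spec_transport_1_0_2 a out) := by unfold Spec_transport_1_0_2; infer_instance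

-- ===== CLAIM (what is proved, stated in full; the proofs are below) =====
def Claim_equal_transport_1_0_2 : Prop := ∀ (a : List (List (List String))), Dom_transport_1_0_2 a → Spec_transport_1_0_2 a (transport_1_0_2 a)

-- ===== LEMMAS AND PROOFS =====

-- maximum row length (reference form used by both sides of the proof)
def pvMax (rows : List (List (List String))) : Nat :=
  rows.foldr (fun j m => max j.length m) 0

-- column k, A-style
def colN (rows : List (List (List String))) (k : Nat) : List (List String) :=
  rows.map (fun j => if j.length ≤ k then ["0", "0"] else (j[k]?).getD [])

theorem foldl_snoc_map {α β : Type} (l : List α) (s : List β) (g : α → β) :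
    l.foldl (fun acc x => acc ++ [g x]) s = s ++ l.map g := by
  induction l generalizing s with
  | nil => simp
  | cons x xs ih => simp [ih]

theorem foldl_max_int (a : List (List (List String))) (m : Nat) :
    a.foldl (fun m i => if m < (i.length : Int) then (i.length : Int) else m) (m : Int)
      = ((a.foldl (fun m j => max m j.length) m : Nat) : Int) := by
  induction a generalizing m with
  | nil => simp
  | cons x xs ih =>
    simp only [List.foldl_cons]
    rcases Nat.lt_or_ge m x.length with h | h
    · rw [if_pos (by exact_mod_cast h), max_eq_right h.le]
      exact ih x.length
    · rw [if_neg (by exact_mod_cast Nat.not_lt.mpr h), max_eq_left h, ih]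

theorem foldl_max_eq (a : List (List (List String))) (c : Nat) :
    a.foldl (fun m j => max m j.length) c = max c (pvMax a) := by
  induction a generalizing c with
  | nil => simp [pvMax]
  | cons x xs ih => simp only [List.foldl_cons, pvMax, List.foldr_cons, ih]; omega

theorem pvMax_zero_of_all_empty (rows : List (List (List String)))
    (h : rows.any (fun r => !r.isEmpty) = false) : pvMax rows = 0 := by
  induction rows with
  | nil => simp [pvMax]
  | cons r rs ih =>
    simp only [List.any_cons, Bool.or_eq_false_iff] at h
    have hr : r = [] := by
      cases r with
      | nil => rfl
      | cons a b => simp at h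
    subst hr
    simp only [pvMax, List.foldr_cons] at *
    simp [ih h.2]

theorem pvMax_pos_of_any (rows : List (List (List String)))
    (h : rows.any (fun r => !r.isEmpty) = true) : 0 < pvMax rows := by
  induction rows with
  | nil => simp at h
  | cons r rs ih =>
    simp only [List.any_cons, Bool.or_eq_true] at h
    simp only [pvMax, List.foldr_cons]
    rcases h with h | h
    · have : r ≠ [] := by simpa using h
      have : 0 < r.length := List.length_pos_iff.mpr this
      omega
    · have := ih h
      simp only [pvMax] at this
      omega

theorem pvMax_tail (rows : List (List (List String))) :
    pvMax (rows.map List.tail) = pvMax rows - 1 := by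
  induction rows with
  | nil => simp [pvMax]
  | cons r rs ih =>
    simp only [pvMax, List.map_cons, List.foldr_cons] at *
    rw [ih, List.length_tail]
    omega

theorem col_zero (rows : List (List (List String))) :
    colN rows 0 = rows.map (fun r => r.headD ["0", "0"]) := by
  unfold colN
  apply List.map_congr_left
  intro j _
  cases j <;> simp

theorem col_shift (rows : List (List (List String))) (k : Nat) :
    colN (rows.map List.tail) k = colN rows (k + 1) := by
  unfold colN
  rw [List.map_map]
  apply List.map_congr_left
  intro j _
  cases j with
  | nil => simp
  | cons x t => simp

theorem altGo_eq (rows : List (List (List String))) (out : List (List (List String))) :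
    altGo rows out = out ++ (List.range (pvMax rows)).map (colN rows) := by
  rw [altGo.eq_def]
  split
  · next h =>
    rw [altGo_eq (rows.map List.tail)]
    have hpos := pvMax_pos_of_any rows h
    obtain ⟨n, hn⟩ : ∃ n, pvMax rows = n + 1 := ⟨pvMax rows - 1, by omega⟩
    rw [pvMax_tail, hn]
    simp only [Nat.add_sub_cancel, List.range_succ_eq_map, List.map_cons, List.map_map]
    rw [col_zero, List.append_assoc]
    congr 1
    simp only [List.singleton_append]
    congr 1
    apply List.map_congr_left
    intro k _
    simpa using col_shift rows k
  · next h =>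
    rw [pvMax_zero_of_all_empty rows (by simpa using h)]
    simp
termination_by pvCells rows
decreasing_by exact pvCells_tail_lt rows ‹_›

theorem portA_eq (a : List (List (List String))) :
    transport_1_0_2 a = (List.range (pvMax a)).map (colN a) := by
  have hmax : a.foldl (fun m i => if m < (i.length : Int) then (i.length : Int) else m) ((0 : Nat) : Int)
      = ((pvMax a : Nat) : Int) := by
    have h1 := foldl_max_int a 0
    rw [foldl_max_eq a 0] at h1
    simpa using h1
  unfold transport_1_0_2
  simp only [Int.natCast_zero] at hmax
  rw [hmax, foldl_snoc_map, PySem.List.pyRange_one, List.map_map]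
  simp only [List.nil_append, Int.sub_zero, Int.toNat_natCast]
  apply List.map_congr_left
  intro k hk
  rw [List.mem_range] at hk
  simp only [Function.comp_apply]
  rw [foldl_snoc_map]
  unfold colN
  simp only [List.nil_append]
  apply List.map_congr_left
  intro j _
  have hz : (0 : Int) + (k : Int) = (k : Int) := by ring
  rw [hz]
  by_cases h : j.length ≤ k
  · rw [if_pos (by exact_mod_cast h), if_pos h]
  · rw [if_neg (by exact_mod_cast h), if_neg h, PySem.List.pyGet?_natCast]

-- ===== VERDICT (by name: the statement is the Claim_ definition above) =====
theorem transport_1_0_2_spec : Claim_equal_transport_1_0_2 := by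
  intro a _
  show transport_1_0_2 a = transport_1_0_2_alt a
  rw [portA_eq, transport_1_0_2_alt, altGo_eq]
  simp
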